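-- pv_equiv track=rewrite | github.com/lzy1732008/FTgetKey_trainclassier | getFeatureTYC/createDict.py | searchCandidateSet
-- ===== SOURCE A (Python) =====
-- def searchCandidateSet(corpus,corpuscontent):
--     candidate = {}
--     point = 0
--     while point < len(corpus)-1:
--         s2 = str(corpus[point])+str(corpus[point+1])
--         num2 = corpuscontent.count(s2,0,len(corpuscontent))
--         if num2 >= 1:
--             candidate[s2] = num2
--             if point + 2 < len(corpus):
--                 s3 = s2+corpus[point+2]
--                 num3 = corpuscontent.count(s3)
--                 if num3 >= 1:
--                     candidate[s3] = num3
--                     if point + 3 <len(corpus):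
--                         s4 = s3 + corpus[point + 3]
--                         num4 = corpuscontent.count(s4)
--                         if num4 >= 1:
--                             candidate[s4] = num4
--         point += 1
--     return candidate
-- ===== SOURCE B (Python) =====
-- def searchCandidateSet(corpus, corpuscontent):
--     # Flat scan: one loop over (position, gram-length); a longer gram can only occur
--     # if its prefix does, so no nested conditions are needed.
--     candidate = {}
--     n = len(corpus)
--     for point in range(n):
--         for L in (2, 3, 4):
--             if point + L <= n:
--                 gram = corpus[point:point + L]
--                 if gram in corpuscontent:
--                     candidate[gram] = corpuscontent.count(gram)
--     return candidate
-- ===== Notes on version B (the rewrite author's own statement) =====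
-- stated objective: simpler
-- what changed: A's nested if-ladder (2-gram, then 3-gram inside it, then 4-gram) is replaced by one flat loop over (position, gram-length) with a single independent occurrence test per gram, relying on the fact that a gram can only occur in the content if its prefix does.
import Mathlib
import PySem

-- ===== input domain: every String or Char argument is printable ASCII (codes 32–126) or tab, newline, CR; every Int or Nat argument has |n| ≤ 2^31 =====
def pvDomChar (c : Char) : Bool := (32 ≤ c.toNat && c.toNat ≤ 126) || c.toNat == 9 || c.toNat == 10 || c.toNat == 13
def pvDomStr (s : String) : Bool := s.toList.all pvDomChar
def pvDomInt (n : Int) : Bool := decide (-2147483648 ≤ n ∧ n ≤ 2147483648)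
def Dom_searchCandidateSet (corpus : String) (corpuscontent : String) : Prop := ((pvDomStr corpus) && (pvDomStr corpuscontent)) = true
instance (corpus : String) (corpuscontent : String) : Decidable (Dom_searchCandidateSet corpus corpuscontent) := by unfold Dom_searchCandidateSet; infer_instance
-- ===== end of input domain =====

-- B replaces A's nested 2/3/4-gram conditionals by one flat loop over (position, length),
-- relying on the fact that a gram can only occur in the content if its prefix does (objective: simpler).

-- ===== PORT A =====
-- A's loop body: the nested "if count >= 1" ladder for the 2-, 3- and 4-gram at `point`.
-- corpus[i] is always accessed in range (the guards ensure it), so List.getD is exact here.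
def searchCandidateSetStep (cs content : List Char) (point : Nat)
    (d : PySem.Dict String Int) : PySem.Dict String Int :=
  let l2 := [cs.getD point ' ', cs.getD (point+1) ' ']
  -- corpuscontent.count(s2, 0, len(corpuscontent)) counts in the slice content[0:len] — ported as such
  let num2 : Int := (PySem.Chars.count (PySem.List.slice content (some 0) (some (content.length:Int))) l2 : Nat)
  if 1 ≤ num2 then
    let d2 := d.insert (String.ofList l2) num2
    if point + 2 < cs.length then
      let l3 := l2 ++ [cs.getD (point+2) ' ']
      let num3 : Int := (PySem.Chars.count content l3 : Nat)
      if 1 ≤ num3 then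
        let d3 := d2.insert (String.ofList l3) num3
        if point + 3 < cs.length then
          let l4 := l3 ++ [cs.getD (point+3) ' ']
          let num4 : Int := (PySem.Chars.count content l4 : Nat)
          if 1 ≤ num4 then d3.insert (String.ofList l4) num4 else d3
        else d3
      else d2
    else d2
  else d

-- A's while loop: point starts at 0 and increases by 1 while point < len(corpus)-1
-- (fuel = len(corpus) bounds the iteration count, which is len(corpus)-1).
def searchCandidateSetGo (cs content : List Char) (fuel point : Nat)
    (d : PySem.Dict String Int) : PySem.Dict String Int :=
  match fuel with
  | 0 => d
  | fuel + 1 =>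
    if point < cs.length - 1 then
      searchCandidateSetGo cs content fuel (point+1) (searchCandidateSetStep cs content point d)
    else d

def searchCandidateSet (corpus : String) (corpuscontent : String) : List (String × Int) :=
  (searchCandidateSetGo corpus.toList corpuscontent.toList corpus.toList.length 0 PySem.Dict.empty).items

-- ===== PORT B =====
-- B's inner loop: for L in (2, 3, 4): if the gram corpus[point:point+L] fits and occurs, record its count.
def searchCandidateSetAltStep (cs content : List Char)
    (d : PySem.Dict String Int) (point : Nat) : PySem.Dict String Int :=
  [2, 3, 4].foldl (fun d L =>
    if point + L ≤ cs.length then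
      let gram := PySem.List.slice cs (some (point:Int)) (some ((point+L:Nat):Int))
      if PySem.Chars.isIn gram content then
        d.insert (String.ofList gram) ((PySem.Chars.count content gram : Nat) : Int)
      else d
    else d) d

def searchCandidateSet_alt (corpus : String) (corpuscontent : String) : List (String × Int) :=
  ((List.range corpus.toList.length).foldl
    (searchCandidateSetAltStep corpus.toList corpuscontent.toList) PySem.Dict.empty).items

-- ===== PRECONDITION & SPEC =====
def Spec_searchCandidateSet (corpus : String) (corpuscontent : String) (out : List (String × Int)) : Prop := out = searchCandidateSet_alt corpus corpuscontent
instance (corpus : String) (corpuscontent : String) (out : List (String × Int)) : Decidable (Spec_searchCandidateSet corpus corpuscontent out) := by unfold Spec_searchCandidateSet; infer_instance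

-- ===== CLAIM (what is proved, stated in full; the proofs are below) =====
def Claim_equal_searchCandidateSet : Prop := ∀ (corpus : String) (corpuscontent : String), Dom_searchCandidateSet corpus corpuscontent → Spec_searchCandidateSet corpus corpuscontent (searchCandidateSet corpus corpuscontent)

-- ===== LEMMAS AND PROOFS =====

theorem pv_clamp (len : Nat) (k : Nat) (h : k ≤ len) :
    PySem.List.clampIdx len ((k:Nat):Int) = k := by
  unfold PySem.List.clampIdx; split_ifs <;> omega

theorem pv_slice_nat (cs : List Char) (p L : Nat) (h : p + L ≤ cs.length) :
    PySem.List.slice cs (some (p:Int)) (some ((p+L:Nat):Int)) = (cs.drop p).take L := by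
  simp only [PySem.List.slice, pv_clamp cs.length (p+L) h, pv_clamp cs.length p (by omega)]
  congr 1
  omega

theorem pv_slice_full (cs : List Char) :
    PySem.List.slice cs (some 0) (some (cs.length:Int)) = cs := by
  simp [PySem.List.slice]

theorem pv_go_ge (sub : List Char) : ∀ (fuel : Nat) (s : List Char) (acc : Nat),
    acc ≤ PySem.Chars.count.go sub fuel s acc := by
  intro fuel
  induction fuel with
  | zero => intro s acc; simp [PySem.Chars.count.go]
  | succ f ih =>
    intro s acc
    cases s with
    | nil => simp [PySem.Chars.count.go]
    | cons h t =>
      rw [PySem.Chars.count.go]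
      split
      · exact le_trans (by omega) (ih _ (acc+1))
      · exact ih _ acc

theorem pv_go_not_infix (sub : List Char) : ∀ (fuel : Nat) (s : List Char) (acc : Nat),
    ¬ sub <:+: s → PySem.Chars.count.go sub fuel s acc = acc := by
  intro fuel
  induction fuel with
  | zero => intro s acc _; simp [PySem.Chars.count.go]
  | succ f ih =>
    intro s acc hni
    cases s with
    | nil => simp [PySem.Chars.count.go]
    | cons h t =>
      rw [PySem.Chars.count.go]
      split
      · rename_i hp
        exact absurd ((List.isPrefixOf_iff_prefix.mp hp).isInfix) hni
      · exact ih t acc (fun hi => hni (List.infix_cons_iff.mpr (Or.inr hi)))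

theorem pv_go_infix (sub : List Char) (hne : sub ≠ []) : ∀ (fuel : Nat) (s : List Char) (acc : Nat),
    s.length ≤ fuel → sub <:+: s → acc < PySem.Chars.count.go sub fuel s acc := by
  intro fuel
  induction fuel with
  | zero =>
    intro s acc hlen hi
    have : s = [] := List.length_eq_zero_iff.mp (by omega)
    subst this
    exact absurd (List.eq_nil_of_infix_nil hi) hne
  | succ f ih =>
    intro s acc hlen hi
    cases s with
    | nil => exact absurd (List.eq_nil_of_infix_nil hi) hne
    | cons h t =>
      rw [PySem.Chars.count.go]
      split
      · calc acc < acc + 1 := by omega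
          _ ≤ _ := pv_go_ge sub f _ (acc+1)
      · rename_i hp
        have hit : sub <:+: t := by
          rcases List.infix_cons_iff.mp hi with hpre | hit
          · exact absurd (List.isPrefixOf_iff_prefix.mpr hpre) (by simp_all)
          · exact hit
        exact ih t acc (by simp at hlen; omega) hit

-- `s.count(sub) >= 1` is exactly `sub in s`, for nonempty sub.
theorem pv_count_pos_iff (s sub : List Char) (hne : sub ≠ []) :
    (1 ≤ PySem.Chars.count s sub) ↔ sub <:+: s := by
  unfold PySem.Chars.count
  rw [if_neg (by simpa using hne)]
  constructor
  · intro h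
    by_contra hni
    rw [pv_go_not_infix sub _ _ _ hni] at h
    omega
  · intro hi
    exact pv_go_infix sub hne s.length s 0 le_rfl hi

-- the gram corpus[p:p+L] as an explicit character list
theorem pv_take_drop_two (cs : List Char) (p : Nat) (h : p + 2 ≤ cs.length) :
    (cs.drop p).take 2 = [cs.getD p ' ', cs.getD (p+1) ' '] := by
  apply List.ext_getElem
  · simp; omega
  · intro i h1 h2
    simp only [List.length_cons, List.length_nil] at h2
    rw [List.getElem_take, List.getElem_drop]
    rcases i with _ | _ | i
    · simp [List.getD_eq_getElem?_getD, List.getElem?_eq_getElem (show p < cs.length by omega)]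
    · simp [List.getD_eq_getElem?_getD, List.getElem?_eq_getElem (show p + 1 < cs.length by omega)]
    · omega

theorem pv_take_drop_succ (cs : List Char) (p L : Nat) (h : p + L < cs.length) :
    (cs.drop p).take (L+1) = (cs.drop p).take L ++ [cs.getD (p+L) ' '] := by
  rw [List.take_add_one]
  congr 1
  rw [List.getElem?_drop, List.getElem?_eq_getElem (by omega : p + L < cs.length)]
  simp [List.getD_eq_getElem?_getD, List.getElem?_eq_getElem (show p + L < cs.length by omega)]

theorem pv_altStep_skip (cs content : List Char) (d : PySem.Dict String Int) (p : Nat)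
    (h : ¬ p + 2 ≤ cs.length) :
    searchCandidateSetAltStep cs content d p = d := by
  unfold searchCandidateSetAltStep
  simp only [List.foldl]
  rw [if_neg (by omega), if_neg (by omega), if_neg (by omega)]

-- the per-position equality: A's nested ladder = B's flat three conditional inserts
theorem pv_count_cond (content l : List Char) (hne : l ≠ []) :
    ((1:Int) ≤ ((PySem.Chars.count content l : Nat) : Int)) ↔ PySem.Chars.isIn l content = true := by
  rw [PySem.Chars.isIn_iff_infix, ← pv_count_pos_iff content l hne]
  exact_mod_cast Iff.rfl

theorem pv_infix_of_append_infix (l : List Char) (c : Char) (content : List Char)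
    (h : (l ++ [c]) <:+: content) : l <:+: content :=
  (List.prefix_append l [c]).isInfix.trans h

theorem pv_step_eq (cs content : List Char) (d : PySem.Dict String Int) (p : Nat)
    (h2 : p + 2 ≤ cs.length) :
    searchCandidateSetAltStep cs content d p = searchCandidateSetStep cs content p d := by
  have e2 : PySem.List.slice cs (some (p:Int)) (some ((p+2:Nat):Int)) = [cs.getD p ' ', cs.getD (p+1) ' '] := by
    rw [pv_slice_nat cs p 2 h2, pv_take_drop_two cs p h2]
  unfold searchCandidateSetAltStep searchCandidateSetStep
  simp only [List.foldl, pv_slice_full]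
  set l2 := [cs.getD p ' ', cs.getD (p+1) ' '] with hl2
  set l3 := l2 ++ [cs.getD (p+2) ' '] with hl3
  set l4 := l3 ++ [cs.getD (p+3) ' '] with hl4
  have hne2 : l2 ≠ [] := by simp [hl2]
  have hne3 : l3 ≠ [] := by simp [hl3]
  have hne4 : l4 ≠ [] := by simp [hl4]
  simp only [pv_count_cond content l2 hne2, pv_count_cond content l3 hne3,
    pv_count_cond content l4 hne4]
  rw [if_pos h2, e2]
  by_cases h3 : p + 3 ≤ cs.length
  · have t3 : (cs.drop p).take 3 = l3 := by
      rw [show (3:Nat) = 2 + 1 from rfl, pv_take_drop_succ cs p 2 (by omega),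
        pv_take_drop_two cs p h2]
    have e3 : PySem.List.slice cs (some (p:Int)) (some ((p+3:Nat):Int)) = l3 := by
      rw [pv_slice_nat cs p 3 h3, t3]
    rw [if_pos h3, e3]
    have imp32 : PySem.Chars.isIn l3 content = true → PySem.Chars.isIn l2 content = true := by
      intro h
      rw [PySem.Chars.isIn_iff_infix] at *
      exact pv_infix_of_append_infix l2 _ content (hl3 ▸ h)
    by_cases h4 : p + 4 ≤ cs.length
    · have e4 : PySem.List.slice cs (some (p:Int)) (some ((p+4:Nat):Int)) = l4 := by
        rw [pv_slice_nat cs p 4 h4, show (4:Nat) = 3 + 1 from rfl,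
          pv_take_drop_succ cs p 3 (by omega), t3]
      rw [if_pos h4, e4]
      have imp43 : PySem.Chars.isIn l4 content = true → PySem.Chars.isIn l3 content = true := by
        intro h
        rw [PySem.Chars.isIn_iff_infix] at *
        exact pv_infix_of_append_infix l3 _ content (hl4 ▸ h)
      by_cases hin2 : PySem.Chars.isIn l2 content = true
      · rw [if_pos hin2, if_pos hin2, if_pos (by omega : p + 2 < cs.length)]
        by_cases hin3 : PySem.Chars.isIn l3 content = true
        · rw [if_pos hin3, if_pos hin3, if_pos (by omega : p + 3 < cs.length)]
        · have hin4 : ¬ PySem.Chars.isIn l4 content = true := fun h => hin3 (imp43 h)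
          rw [if_neg hin3, if_neg hin3, if_neg hin4]
      · have hin3 : ¬ PySem.Chars.isIn l3 content = true := fun h => hin2 (imp32 h)
        have hin4 : ¬ PySem.Chars.isIn l4 content = true := fun h => hin3 (imp43 h)
        rw [if_neg hin2, if_neg hin2, if_neg hin3, if_neg hin4]
    · rw [if_neg h4]
      by_cases hin2 : PySem.Chars.isIn l2 content = true
      · rw [if_pos hin2, if_pos hin2, if_pos (by omega : p + 2 < cs.length)]
        by_cases hin3 : PySem.Chars.isIn l3 content = true
        · rw [if_pos hin3, if_pos hin3, if_neg (by omega : ¬ p + 3 < cs.length)]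
        · rw [if_neg hin3, if_neg hin3]
      · have hin3 : ¬ PySem.Chars.isIn l3 content = true := fun h => hin2 (imp32 h)
        rw [if_neg hin2, if_neg hin2, if_neg hin3]
  · have h4 : ¬ p + 4 ≤ cs.length := by omega
    rw [if_neg h3, if_neg h4]
    by_cases hin2 : PySem.Chars.isIn l2 content = true
    · rw [if_pos hin2, if_pos hin2, if_neg (by omega : ¬ p + 2 < cs.length)]
    · rw [if_neg hin2, if_neg hin2]

-- the whole loop: B's foldl over range(n) equals A's while loop from any start point
theorem pv_loop_eq (cs content : List Char) : ∀ (k fuel p : Nat) (d : PySem.Dict String Int),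
    cs.length - p = k → k ≤ fuel →
    (List.range' p k).foldl (searchCandidateSetAltStep cs content) d
      = searchCandidateSetGo cs content fuel p d := by
  intro k
  induction k with
  | zero =>
    intro fuel p d hk _
    cases fuel with
    | zero => simp [searchCandidateSetGo]
    | succ f =>
      rw [searchCandidateSetGo, if_neg (by omega)]
      simp
  | succ k ih =>
    intro fuel p d hk hf
    obtain ⟨f, rfl⟩ : ∃ f, fuel = f + 1 := ⟨fuel - 1, by omega⟩
    rw [List.range'_succ, List.foldl_cons]
    by_cases hp : p < cs.length - 1
    · rw [ih f (p+1) _ (by omega) (by omega), pv_step_eq cs content d p (by omega)]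
      conv_rhs => rw [searchCandidateSetGo]
      rw [if_pos hp]
    · -- p = len - 1: both the step and the remaining loop are no-ops
      rw [pv_altStep_skip cs content d p (by omega)]
      rw [ih f (p+1) d (by omega) (by omega)]
      cases f with
      | zero => simp [searchCandidateSetGo, hp]
      | succ f' =>
        rw [searchCandidateSetGo, if_neg (by omega), searchCandidateSetGo, if_neg hp]

-- ===== VERDICT (by name: the statement is the Claim_ definition above) =====
theorem searchCandidateSet_spec : Claim_equal_searchCandidateSet := by
  intro corpus corpuscontent _
  unfold Spec_searchCandidateSet searchCandidateSet searchCandidateSet_alt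
  rw [List.range_eq_range',
    pv_loop_eq corpus.toList corpuscontent.toList corpus.toList.length corpus.toList.length 0
      PySem.Dict.empty (by omega) (by omega)]
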